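-- pv_equiv track=rewrite | github.com/T145/programming-contests | 2016/P1 Secret Club Name/club.py | comp_club
-- ===== SOURCE A (Python) =====
-- def comp_club(s, is_vowel):
-- 	s = list(s)
-- 	if is_vowel:
-- 		locs = [i for i, c in enumerate(s) if c in 'AEIOU']
-- 	else:
-- 		locs = [i for i, c in enumerate(s) if c not in 'AEIOU']
-- 	for l, r in zip(locs[:int(len(locs)/2)], reversed(locs)):
-- 		s[l], s[r] = s[r], s[l]
-- 	return ''.join(s)
-- ===== SOURCE B (Python) =====
-- def comp_club(s, is_vowel):
--     s = list(s)
--     if is_vowel: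
--         locs = [i for i, c in enumerate(s) if c in 'AEIOU']
--     else:
--         locs = [i for i, c in enumerate(s) if c not in 'AEIOU']
--     selected = [s[i] for i in locs]
--     for loc, ch in zip(locs, reversed(selected)):
--         s[loc] = ch
--     return ''.join(s)
-- ===== Notes on version B (the rewrite author's own statement) =====
-- stated objective: alternative
-- what changed: The in-place two-pointer midpoint swap loop is replaced by a gather-reverse-scatter pass: the selected characters are collected, the buffer is reversed, and one forward pass writes them back at the selected positions.
import Mathlib
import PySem

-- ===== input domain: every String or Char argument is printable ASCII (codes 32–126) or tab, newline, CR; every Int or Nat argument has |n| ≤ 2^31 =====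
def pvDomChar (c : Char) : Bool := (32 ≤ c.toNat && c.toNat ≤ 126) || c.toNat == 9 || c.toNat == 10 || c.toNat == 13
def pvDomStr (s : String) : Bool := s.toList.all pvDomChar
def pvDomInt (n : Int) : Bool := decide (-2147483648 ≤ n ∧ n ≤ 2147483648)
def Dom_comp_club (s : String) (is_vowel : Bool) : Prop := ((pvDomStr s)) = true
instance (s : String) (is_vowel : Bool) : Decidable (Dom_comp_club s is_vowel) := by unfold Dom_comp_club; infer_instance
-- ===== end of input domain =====

-- B keeps A's position-selection step but replaces the two-pointer midpoint swap loop by a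
-- gather-reverse-scatter pass (objective: alternative decomposition, same cost).

-- ===== PORT A =====
-- shared by both ports: both Pythons contain the identical locs comprehension
-- (c in 'AEIOU' on a single character c is char membership)
def clubLocs (cs : List Char) (is_vowel : Bool) : List Int :=
  if is_vowel then
    ((PySem.List.enumerate cs 0).filter (fun p => (['A','E','I','O','U'] : List Char).contains p.2)).map Prod.fst
  else
    ((PySem.List.enumerate cs 0).filter (fun p => !(['A','E','I','O','U'] : List Char).contains p.2)).map Prod.fst

-- int(len(locs)/2) = len(locs) // 2 since len ≥ 0, ported as Nat division;
-- simultaneous assignment s[l], s[r] = s[r], s[l]: both reads happen before both writes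
def comp_club (s : String) (is_vowel : Bool) : String :=
  let cs := s.toList
  let locs := clubLocs cs is_vowel
  let pairs := (PySem.List.slice locs none (some ((locs.length / 2 : Nat) : Int))).zip locs.reverse
  let cs' := pairs.foldl (fun t p =>
      let a := PySem.List.pyGetD t p.2 ' '
      let b := PySem.List.pyGetD t p.1 ' '
      PySem.List.pySetD (PySem.List.pySetD t p.1 a) p.2 b) cs
  String.mk cs'

-- ===== PORT B =====
def comp_club_alt (s : String) (is_vowel : Bool) : String :=
  let cs := s.toList
  let locs := clubLocs cs is_vowel
  let selected := locs.map (fun i => PySem.List.pyGetD cs i ' ')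
  let cs' := (locs.zip selected.reverse).foldl (fun t p => PySem.List.pySetD t p.1 p.2) cs
  String.mk cs'

-- ===== PRECONDITION & SPEC =====
def Spec_comp_club (s : String) (is_vowel : Bool) (out : String) : Prop := out = comp_club_alt s is_vowel
instance (s : String) (is_vowel : Bool) (out : String) : Decidable (Spec_comp_club s is_vowel out) := by unfold Spec_comp_club; infer_instance

-- ===== CLAIM (what is proved, stated in full; the proofs are below) =====
def Claim_equal_comp_club : Prop := ∀ (s : String) (is_vowel : Bool), Dom_comp_club s is_vowel → Spec_comp_club s is_vowel (comp_club s is_vowel)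

-- ===== LEMMAS AND PROOFS =====

-- Nat-level versions of the two loops
def swapFoldN (cs : List Char) (ps : List (Nat × Nat)) : List Char :=
  ps.foldl (fun t p =>
      let a := t.getD p.2 ' '
      let b := t.getD p.1 ' '
      (t.set p.1 a).set p.2 b) cs

def scatterN (cs : List Char) (qs : List (Nat × Char)) : List Char :=
  qs.foldl (fun t p => t.set p.1 p.2) cs

-- index list of positions satisfying a predicate, at Nat level
def idxOfP (cs : List Char) (p : Char → Bool) (s : Nat) : List Nat :=
  match cs with
  | [] => []
  | c :: cs => if p c then s :: idxOfP cs p (s + 1) else idxOfP cs p (s + 1)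

theorem enum_filter_map_eq (cs : List Char) (p : Char → Bool) (s : Nat) :
    ((PySem.List.enumerate cs (s : Int)).filter (fun q => p q.2)).map Prod.fst
      = (idxOfP cs p s).map (fun n : Nat => (n : Int)) := by
  induction cs generalizing s with
  | nil => simp [PySem.List.enumerate_nil, idxOfP]
  | cons c cs ih =>
    have h1 : ((s : Int) + 1) = ((s + 1 : Nat) : Int) := by push_cast; ring
    simp only [PySem.List.enumerate_cons, List.filter_cons, idxOfP, h1]
    by_cases hp : p c
    · simp only [hp, if_true, List.map_cons]
      rw [ih (s + 1)]
    · simp only [hp, if_false, Bool.false_eq_true]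
      exact ih (s + 1)

theorem idxOfP_bounds (cs : List Char) (p : Char → Bool) (s : Nat) :
    ∀ i ∈ idxOfP cs p s, s ≤ i ∧ i < s + cs.length := by
  induction cs generalizing s with
  | nil => simp [idxOfP]
  | cons c cs ih =>
    intro i hi
    simp only [idxOfP] at hi
    split at hi
    · rcases List.mem_cons.1 hi with rfl | hi
      · simp
      · have h := ih (s + 1) i hi
        simp only [List.length_cons]
        omega
    · have h := ih (s + 1) i hi
      simp only [List.length_cons]
      omega

theorem idxOfP_pairwise (cs : List Char) (p : Char → Bool) (s : Nat) :
    (idxOfP cs p s).Pairwise (· < ·) := by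
  induction cs generalizing s with
  | nil => simp [idxOfP]
  | cons c cs ih =>
    simp only [idxOfP]
    split
    · exact List.pairwise_cons.2 ⟨fun i hi => by have := (idxOfP_bounds cs p (s + 1) i hi).1; omega, ih (s + 1)⟩
    · exact ih (s + 1)

theorem idxOfP_nodup (cs : List Char) (p : Char → Bool) (s : Nat) :
    (idxOfP cs p s).Nodup :=
  (idxOfP_pairwise cs p s).imp (fun h => Nat.ne_of_lt h)

-- zip against a longer right list ignores the right tail
theorem zip_append_right_of_le {α β : Type} (l1 : List α) (l2 l3 : List β)
    (h : l1.length ≤ l2.length) : l1.zip (l2 ++ l3) = l1.zip l2 := by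
  induction l1 generalizing l2 with
  | nil => simp
  | cons x xs ih =>
    cases l2 with
    | nil => simp at h
    | cons y ys =>
      simp only [List.cons_append, List.zip_cons_cons]
      exact congrArg _ (ih ys (by simpa using h))

-- a set at an index not written by the scatter commutes out
theorem scatterN_set_comm (qs : List (Nat × Char)) (x : List Char) (b : Nat) (v : Char)
    (h : ∀ q ∈ qs, q.1 ≠ b) : scatterN (x.set b v) qs = (scatterN x qs).set b v := by
  induction qs generalizing x with
  | nil => simp [scatterN]
  | cons q qs ih =>
    simp only [scatterN, List.foldl_cons] at *
    rw [List.set_comm _ _ (Ne.symm (h q (by simp)))]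
    exact ih _ (fun q hq => h q (by simp [hq]))

theorem getD_set_ne (l : List Char) (i j : Nat) (v d : Char) (h : i ≠ j) :
    (l.set j v).getD i d = l.getD i d := by
  simp [List.getD_eq_getElem?_getD, List.getElem?_set_ne (by omega : j ≠ i)]

-- core: the midpoint swap loop equals gather-reverse-scatter
theorem core (n : Nat) : ∀ (L : List Nat) (cs : List Char), L.length ≤ n → L.Nodup →
    (∀ i ∈ L, i < cs.length) →
    swapFoldN cs ((L.take (L.length / 2)).zip L.reverse)
      = scatterN cs (L.zip ((L.map (fun i => cs.getD i ' ')).reverse)) := by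
  induction n with
  | zero =>
    intro L cs hlen _ _
    have : L = [] := List.eq_nil_of_length_eq_zero (Nat.le_zero.1 hlen)
    subst this; simp [swapFoldN, scatterN]
  | succ n ih =>
    intro L cs hlen hnd hbd
    match L with
    | [] => simp [swapFoldN, scatterN]
    | a :: rest =>
      rcases rest.eq_nil_or_concat with rfl | ⟨M, b, rfl⟩
      · -- singleton: no swap; scatter rewrites the sole position with its own char
        have ha : a < cs.length := hbd a (by simp)
        simp only [List.length_cons, List.length_nil, swapFoldN, scatterN, List.map_cons,
          List.map_nil, List.reverse_cons, List.reverse_nil, List.nil_append, List.take,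
          List.zip_nil_left, List.foldl_nil, List.zip_cons_cons, List.foldl_cons]
        rw [List.getD_eq_getElem cs ' ' ha]
        simp [List.set_getElem_self]
      · simp only [List.concat_eq_append] at hlen hnd hbd ⊢
        have haMb : a ∉ M ++ [b] := (List.nodup_cons.1 hnd).1
        have hrest : (M ++ [b]).Nodup := (List.nodup_cons.1 hnd).2
        have hab : a ≠ b := by intro h'; exact haMb (by simp [h'])
        have haM : a ∉ M := by intro h'; exact haMb (by simp [h'])
        have hbM : b ∉ M := by
          simp only [List.nodup_append] at hrest
          tauto
        have hMnd : M.Nodup := by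
          simp only [List.nodup_append] at hrest
          tauto
        have ha : a < cs.length := hbd a (by simp)
        have hb : b < cs.length := hbd b (by simp)
        have hMb : ∀ i ∈ M, i < cs.length := fun i hi => hbd i (by simp [hi])
        have hdiv : (a :: (M ++ [b])).length / 2 = M.length / 2 + 1 := by
          simp only [List.length_cons, List.length_append, List.length_nil]
          omega
        have htake : (a :: (M ++ [b])).take ((a :: (M ++ [b])).length / 2)
            = a :: M.take (M.length / 2) := by
          rw [hdiv, List.take_succ_cons,
            List.take_append_of_le_length (by omega : M.length / 2 ≤ M.length)]
        have hrev : (a :: (M ++ [b])).reverse = b :: (M.reverse ++ [a]) := by simp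
        set cs' : List Char := (cs.set a (cs.getD b ' ')).set b (cs.getD a ' ') with hcs'
        have hlen' : cs'.length = cs.length := by simp [hcs']
        have step1 : swapFoldN cs (((a :: (M ++ [b])).take ((a :: (M ++ [b])).length / 2)).zip
              (a :: (M ++ [b])).reverse)
            = swapFoldN cs' ((M.take (M.length / 2)).zip M.reverse) := by
          rw [htake, hrev, List.zip_cons_cons,
            zip_append_right_of_le _ _ _ (by simp only [List.length_take, List.length_reverse]; omega)]
          simp [swapFoldN, hcs']
        have hlenM : M.length ≤ n := by
          simp only [List.length_cons, List.length_append, List.length_nil] at hlen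
          omega
        have ihM := ih M cs' hlenM hMnd (fun i hi => by rw [hlen']; exact hMb i hi)
        have hsel : M.map (fun i => cs'.getD i ' ') = M.map (fun i => cs.getD i ' ') := by
          apply List.map_congr_left
          intro i hi
          rw [hcs', getD_set_ne _ _ _ _ _ (by rintro rfl; exact hbM hi),
            getD_set_ne _ _ _ _ _ (by rintro rfl; exact haM hi)]
        have hselL : ((a :: (M ++ [b])).map (fun i => cs.getD i ' ')).reverse
            = cs.getD b ' ' :: ((M.map (fun i => cs.getD i ' ')).reverse ++ [cs.getD a ' ']) := by
          simp
        have hzip : (a :: (M ++ [b])).zip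
              (cs.getD b ' ' :: ((M.map (fun i => cs.getD i ' ')).reverse ++ [cs.getD a ' ']))
            = (a, cs.getD b ' ') :: (M.zip ((M.map (fun i => cs.getD i ' ')).reverse)
                ++ [(b, cs.getD a ' ')]) := by
          rw [List.zip_cons_cons, List.zip_append (by simp)]
          simp
        have hq : ∀ q ∈ M.zip ((M.map (fun i => cs.getD i ' ')).reverse), q.1 ≠ b := by
          intro q hq
          have := (List.of_mem_zip hq).1
          rintro rfl; exact hbM this
        calc swapFoldN cs (((a :: (M ++ [b])).take ((a :: (M ++ [b])).length / 2)).zip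
              (a :: (M ++ [b])).reverse)
            = swapFoldN cs' ((M.take (M.length / 2)).zip M.reverse) := step1
          _ = scatterN cs' (M.zip ((M.map (fun i => cs'.getD i ' ')).reverse)) := ihM
          _ = scatterN cs' (M.zip ((M.map (fun i => cs.getD i ' ')).reverse)) := by rw [hsel]
          _ = (scatterN (cs.set a (cs.getD b ' '))
                (M.zip ((M.map (fun i => cs.getD i ' ')).reverse))).set b (cs.getD a ' ') := by
              rw [hcs']; exact scatterN_set_comm _ _ _ _ hq
          _ = scatterN cs ((a :: (M ++ [b])).zip
                (((a :: (M ++ [b])).map (fun i => cs.getD i ' ')).reverse)) := by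
              rw [hselL, hzip]
              simp [scatterN, List.foldl_append]

-- the locs predicate, definitionally the lambda of each branch of clubLocs
def clubPred : Bool → Char → Bool
  | true => fun c => (['A','E','I','O','U'] : List Char).contains c
  | false => fun c => !(['A','E','I','O','U'] : List Char).contains c

theorem clubLocs_eq (cs : List Char) (is_vowel : Bool) :
    clubLocs cs is_vowel = (idxOfP cs (clubPred is_vowel) 0).map (fun n : Nat => (n : Int)) := by
  cases is_vowel with
  | false =>
    have h := enum_filter_map_eq cs (clubPred false) 0
    rw [Nat.cast_zero] at h
    exact h
  | true =>
    have h := enum_filter_map_eq cs (clubPred true) 0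
    rw [Nat.cast_zero] at h
    exact h

-- cast elimination for B's scatter loop
theorem foldl_pySetD_cast (L : List Nat) (X : List Char) (cs : List Char) :
    ((L.map (fun n : Nat => (n : Int))).zip X).foldl (fun t p => PySem.List.pySetD t p.1 p.2) cs
      = scatterN cs (L.zip X) := by
  induction L generalizing X cs with
  | nil => simp [scatterN]
  | cons a L ih =>
    cases X with
    | nil => simp [scatterN]
    | cons x X =>
      simp only [List.map_cons, List.zip_cons_cons, List.foldl_cons, scatterN] at *
      rw [PySem.List.pySetD_natCast]
      exact ih X _

theorem comp_club_eq_swapFoldN (s : String) (is_vowel : Bool) :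
    comp_club s is_vowel =
      String.mk (swapFoldN s.toList
        (((idxOfP s.toList (clubPred is_vowel) 0).take
            ((idxOfP s.toList (clubPred is_vowel) 0).length / 2)).zip
          (idxOfP s.toList (clubPred is_vowel) 0).reverse)) := by
  simp only [comp_club]
  rw [clubLocs_eq, PySem.List.slice_to_natCast]
  congr 1
  simp only [List.length_map, ← List.map_take, ← List.map_reverse, List.zip_map, List.foldl_map]
  apply PySem.List.foldl_congr_mem
  intro acc p _
  simp [Prod.map, PySem.List.pyGetD_natCast, PySem.List.pySetD_natCast]

theorem comp_club_alt_eq_scatterN (s : String) (is_vowel : Bool) :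
    comp_club_alt s is_vowel =
      String.mk (scatterN s.toList
        ((idxOfP s.toList (clubPred is_vowel) 0).zip
          (((idxOfP s.toList (clubPred is_vowel) 0).map
              (fun i => s.toList.getD i ' ')).reverse))) := by
  simp only [comp_club_alt]
  rw [clubLocs_eq]
  congr 1
  rw [List.map_map]
  have hf : ((fun i : Int => PySem.List.pyGetD s.toList i ' ') ∘ (fun n : Nat => (n : Int)))
      = (fun i : Nat => s.toList.getD i ' ') := by
    funext i
    simp [Function.comp, PySem.List.pyGetD_natCast]
  rw [hf, foldl_pySetD_cast]

-- ===== VERDICT (by name: the statement is the Claim_ definition above) =====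
theorem comp_club_spec : Claim_equal_comp_club := by
  intro s is_vowel _
  unfold Spec_comp_club
  rw [comp_club_eq_swapFoldN, comp_club_alt_eq_scatterN]
  congr 1
  exact core (idxOfP s.toList (clubPred is_vowel) 0).length _ s.toList le_rfl
    (idxOfP_nodup _ _ _)
    (fun i hi => by simpa using (idxOfP_bounds s.toList (clubPred is_vowel) 0 i hi).2)
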